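-- pv_equiv track=rewrite | github.com/aim2nasa/aims | backend/api/document_pipeline/xpipe/pipeline.py | _find_comment_pos
-- ===== SOURCE A (Python) =====
-- def _find_comment_pos(s: str) -> int:
--     """문자열에서 따옴표 밖의 # 위치를 찾는다"""
--     in_single = False
--     in_double = False
--     for i, c in enumerate(s):
--         if c == "'" and not in_double:
--             in_single = not in_single
--         elif c == '"' and not in_single:
--             in_double = not in_double
--         elif c == "#" and not in_single and not in_double:
--             # # 앞에 공백이 있거나 시작인 경우만 주석
--             if i == 0 or s[i - 1] == " ":
--                 return i
--     return -1
-- ===== SOURCE B (Python) =====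
-- def _find_comment_pos(s: str) -> int:
--     """문자열에서 따옴표 밖의 # 위치를 찾는다"""
--     # Pass 1: inq[i] is True iff position i is entered while inside quotes.
--     inq = []
--     in_single = in_double = False
--     for c in s:
--         inq.append(in_single or in_double)
--         if c == "'" and not in_double:
--             in_single = not in_single
--         elif c == '"' and not in_single:
--             in_double = not in_double
--     # Pass 2: first unquoted '#' at the start or after a space.
--     for i, c in enumerate(s):
--         if c == '#' and not inq[i] and (i == 0 or s[i - 1] == ' '):
--             return i
--     return -1
-- ===== Notes on version B (the rewrite author's own statement) =====
-- stated objective: alternative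
-- what changed: Splits the single stateful scan with early return into two passes: one builds a boolean in-quotes mask for every position, a second stateless scan returns the index of the first unquoted hash that sits at the start or after a space.
import Mathlib
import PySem

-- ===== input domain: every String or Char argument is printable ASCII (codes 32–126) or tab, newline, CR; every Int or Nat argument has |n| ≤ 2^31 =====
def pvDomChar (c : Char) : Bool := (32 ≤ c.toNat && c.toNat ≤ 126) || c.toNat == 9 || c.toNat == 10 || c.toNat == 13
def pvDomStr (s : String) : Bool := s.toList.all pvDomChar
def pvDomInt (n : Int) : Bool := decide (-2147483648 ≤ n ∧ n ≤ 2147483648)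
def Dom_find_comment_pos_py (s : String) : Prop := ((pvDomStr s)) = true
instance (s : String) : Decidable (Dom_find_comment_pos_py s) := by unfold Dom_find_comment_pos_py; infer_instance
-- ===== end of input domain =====

-- B replaces A's single stateful scan-with-early-return by two passes: build an
-- in-quotes mask for every position, then a stateless scan for the first valid '#'.


-- ===== PORT A =====
-- loop over enumerate(s) with quote state and early return; s[i-1] via pyGet? (i ≥ 1 there)
def pvFindA (s : List Char) : List Char → Nat → Bool → Bool → Int
  | [], _, _, _ => -1
  | c :: rest, i, ins, ind =>
    if c == '\'' && !ind then pvFindA s rest (i + 1) (!ins) ind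
    else if c == '"' && !ins then pvFindA s rest (i + 1) ins (!ind)
    else if c == '#' && !ins && !ind then
      if i == 0 || PySem.List.pyGet? s ((i : Int) - 1) == some ' ' then (i : Int)
      else pvFindA s rest (i + 1) ins ind
    else pvFindA s rest (i + 1) ins ind

def find_comment_pos_py (s : String) : Int := pvFindA s.toList s.toList 0 false false

-- ===== PORT B =====
-- pass 1: in-quotes state as it enters each character
def pvMask : List Char → Bool → Bool → List Bool
  | [], _, _ => []
  | c :: rest, ins, ind =>
    (ins || ind) ::
      (if c == '\'' && !ind then pvMask rest (!ins) ind
       else if c == '"' && !ins then pvMask rest ins (!ind)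
       else pvMask rest ins ind)

-- pass 2: first i with s[i] = '#', not in quotes, at start or after a space
def pvScanB (s : List Char) (inq : List Bool) : List Char → Nat → Int
  | [], _ => -1
  | c :: rest, i =>
    if c == '#' && !(inq.getD i false) &&
        (i == 0 || PySem.List.pyGet? s ((i : Int) - 1) == some ' ') then (i : Int)
    else pvScanB s inq rest (i + 1)

def find_comment_pos_py_alt (s : String) : Int :=
  pvScanB s.toList (pvMask s.toList false false) s.toList 0

-- ===== PRECONDITION & SPEC =====
def Spec_find_comment_pos_py (s : String) (out : Int) : Prop := out = find_comment_pos_py_alt s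
instance (s : String) (out : Int) : Decidable (Spec_find_comment_pos_py s out) := by unfold Spec_find_comment_pos_py; infer_instance

-- ===== CLAIM (what is proved, stated in full; the proofs are below) =====
def Claim_equal_find_comment_pos_py : Prop := ∀ (s : String), Dom_find_comment_pos_py s → Spec_find_comment_pos_py s (find_comment_pos_py s)

-- ===== LEMMAS AND PROOFS =====

-- The scan of A from state (ins, ind) at index i equals B's scan when inq's suffix
-- from i is exactly the mask generated from that state over the remaining chars.
theorem pvFindA_eq_pvScanB (s : List Char) (rest : List Char) :
    ∀ (i : Nat) (ins ind : Bool) (inq : List Bool),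
      inq.drop i = pvMask rest ins ind →
      pvFindA s rest i ins ind = pvScanB s inq rest i := by
  induction rest with
  | nil => intro i ins ind inq _; simp [pvFindA, pvScanB]
  | cons c rs ih =>
    intro i ins ind inq h
    rw [pvMask] at h
    have hget : inq[i]? = some (ins || ind) := by
      have := congrArg (fun l => l[0]?) h
      simpa using this
    have hdrop : inq.drop (i + 1) =
        (if c == '\'' && !ind then pvMask rs (!ins) ind
         else if c == '"' && !ins then pvMask rs ins (!ind)
         else pvMask rs ins ind) := by
      have : inq.drop (i + 1) = (inq.drop i).drop 1 := by
        rw [List.drop_drop]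
      rw [this, h]; rfl
    by_cases h1 : (c == '\'' && !ind) = true
    · have hc : c = '\'' := by
        have := (Bool.and_eq_true _ _).mp h1 |>.1; exact beq_iff_eq.mp this
      rw [pvFindA, pvScanB, if_pos h1]
      have : ¬ (c == '#' && !(inq.getD i false) &&
          (i == 0 || PySem.List.pyGet? s ((i : Int) - 1) == some ' ')) = true := by
        simp [hc]
      rw [if_neg this]
      exact ih (i + 1) (!ins) ind inq (by rw [hdrop, if_pos h1])
    · by_cases h2 : (c == '"' && !ins) = true
      · have hc : c = '"' := by
          have := (Bool.and_eq_true _ _).mp h2 |>.1; exact beq_iff_eq.mp this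
        rw [pvFindA, pvScanB, if_neg h1, if_pos h2]
        have : ¬ (c == '#' && !(inq.getD i false) &&
            (i == 0 || PySem.List.pyGet? s ((i : Int) - 1) == some ' ')) = true := by
          simp [hc]
        rw [if_neg this]
        exact ih (i + 1) ins (!ind) inq (by rw [hdrop, if_neg h1, if_pos h2])
      · have hdrop' : inq.drop (i + 1) = pvMask rs ins ind := by
          rw [hdrop, if_neg h1, if_neg h2]
        by_cases h3 : (c == '#' && !ins && !ind) = true
        · have hins : ins = false := by
            rcases (Bool.and_eq_true _ _).mp h3 with ⟨h', _⟩
            rcases (Bool.and_eq_true _ _).mp h' with ⟨_, hi⟩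
            simpa using hi
          have hind : ind = false := by
            rcases (Bool.and_eq_true _ _).mp h3 with ⟨_, hi⟩
            simpa using hi
          have hc : c = '#' := by
            rcases (Bool.and_eq_true _ _).mp h3 with ⟨h', _⟩
            rcases (Bool.and_eq_true _ _).mp h' with ⟨hi, _⟩
            exact beq_iff_eq.mp hi
          rw [pvFindA, pvScanB, if_neg h1, if_neg h2, if_pos h3]
          by_cases h4 : (i == 0 || PySem.List.pyGet? s ((i : Int) - 1) == some ' ') = true
          · rw [if_pos h4]
            have : (c == '#' && !(inq.getD i false) &&
                (i == 0 || PySem.List.pyGet? s ((i : Int) - 1) == some ' ')) = true := by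
              simp [hc, List.getD, hget, hins, hind, h4]
            rw [if_pos this]
          · rw [if_neg h4]
            have : ¬ (c == '#' && !(inq.getD i false) &&
                (i == 0 || PySem.List.pyGet? s ((i : Int) - 1) == some ' ')) = true := by
              simp [hc, List.getD, hget, hins, hind]; simpa using h4
            rw [if_neg this]
            exact ih (i + 1) ins ind inq hdrop'
        · rw [pvFindA, pvScanB, if_neg h1, if_neg h2, if_neg h3]
          have : ¬ (c == '#' && !(inq.getD i false) &&
              (i == 0 || PySem.List.pyGet? s ((i : Int) - 1) == some ' ')) = true := by
            by_cases hc : (c == '#') = true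
            · have hoi : (ins || ind) = true := by
                cases ins <;> cases ind <;> simp_all
              simp [List.getD, hget, hoi]
            · simp [hc]
          rw [if_neg this]
          exact ih (i + 1) ins ind inq hdrop'

-- ===== VERDICT (by name: the statement is the Claim_ definition above) =====
theorem find_comment_pos_py_spec : Claim_equal_find_comment_pos_py := by
  intro s _
  unfold Spec_find_comment_pos_py find_comment_pos_py find_comment_pos_py_alt
  exact pvFindA_eq_pvScanB s.toList s.toList 0 false false _ rfl
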